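-- pv_equiv track=rewrite | github.com/pradigtaMD/Tugas_PCD | Contrast_Stretching.py | applyContrastStretching
-- ===== SOURCE A (Python) =====
-- from copy import deepcopy
--
-- def setGrayColor(color):
--     return [color, color, color]
--
-- def getGrayColor(rgb):
--     return rgb[0]
--
-- def applyContrastStretching(img, r1, s1, r2, s2):
--     ct = deepcopy(img)
--
--     for i in range(len(img)):
--         for j in range(len(img[i])):
--             x = getGrayColor(img[i][j])
--             if 0 <= x <= r1:
--                 ct[i][j] = setGrayColor(int(s1 / r1 * x))
--             elif r1 < x <= r2:
--                 ct[i][j] = setGrayColor(int(((s2 - s1) / (r2 - r1)) * (x - r1) + s1))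
--             elif r2 < x <= 255:
--                 ct[i][j] = setGrayColor(int(((255 - s2) / (255 - r2)) * (x - r2) + s2))
--
--     return ct
-- ===== SOURCE B (Python) =====
-- from copy import deepcopy
--
-- def setGrayColor(color):
--     return [color, color, color]
--
-- def getGrayColor(rgb):
--     return rgb[0]
--
-- def applyContrastStretching(img, r1, s1, r2, s2):
--     # Stage 1: the distinct gray values present, in first-seen order.
--     values = dict.fromkeys(getGrayColor(px) for row in img for px in row)
--     # Stage 2: stretch each distinct value ONCE into a lookup table
--     # (values in no band get no entry and pass through unchanged).
--     table = {}
--     for x in values: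
--         if 0 <= x <= r1:
--             table[x] = setGrayColor(int(s1 / r1 * x))
--         elif r1 < x <= r2:
--             table[x] = setGrayColor(int(((s2 - s1) / (r2 - r1)) * (x - r1) + s1))
--         elif r2 < x <= 255:
--             table[x] = setGrayColor(int(((255 - s2) / (255 - r2)) * (x - r2) + s2))
--     # Stage 3: rebuild the image through the table.
--     return [[table.get(getGrayColor(px), px) for px in row] for row in img]
-- ===== Notes on version B (the rewrite author's own statement) =====
-- stated objective: alternative
-- what changed: Instead of index loops that recompute the piecewise stretch per pixel into a deepcopy, B stages three passes: collect the distinct gray values present, stretch each distinct value once into a lookup table, then rebuild the image by table lookup with pass-through for unmapped values.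
import Mathlib
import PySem

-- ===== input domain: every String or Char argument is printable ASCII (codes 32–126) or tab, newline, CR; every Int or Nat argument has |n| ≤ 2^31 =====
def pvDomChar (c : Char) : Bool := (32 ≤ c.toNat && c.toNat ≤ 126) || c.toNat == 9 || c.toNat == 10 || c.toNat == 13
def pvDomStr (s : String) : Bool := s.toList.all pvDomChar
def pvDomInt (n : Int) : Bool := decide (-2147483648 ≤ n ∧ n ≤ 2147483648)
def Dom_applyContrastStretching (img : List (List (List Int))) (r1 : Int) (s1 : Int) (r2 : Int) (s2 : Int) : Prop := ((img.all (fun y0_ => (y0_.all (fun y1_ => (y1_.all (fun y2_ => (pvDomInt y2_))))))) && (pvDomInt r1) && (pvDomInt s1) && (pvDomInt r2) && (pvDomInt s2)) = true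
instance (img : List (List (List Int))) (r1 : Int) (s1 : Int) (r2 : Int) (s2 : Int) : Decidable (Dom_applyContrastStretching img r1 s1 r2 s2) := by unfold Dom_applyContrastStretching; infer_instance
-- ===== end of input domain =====

-- B replaces A's per-pixel index loops over a deepcopy by three staged passes:
-- collect the distinct gray values, stretch each distinct value once into a lookup
-- table, and rebuild the image through the table (return-value equivalence only;
-- A returns a deepcopy, B returns fresh lists — neither mutates the input).
-- Both Pythons use CPython float arithmetic; each port carries its OWN exact model of
-- IEEE-754 binary64 (round to nearest, ties to even; exact on the magnitudes reachable
-- inside Dom — no overflow/subnormals there), and the proofs show the two models agree.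

-- ===== PORT A =====
-- A's float model: exponent from Nat.log2 of numerator/denominator, round-half-even
-- by comparing the fractional part against 1/2.
def aPow2 (e : Int) : ℚ := if 0 ≤ e then (2:ℚ) ^ e.toNat else 1 / (2:ℚ) ^ (-e).toNat

def aRnd (q : ℚ) : ℚ :=
  if q = 0 then 0 else
  let a := |q|
  let e0 : Int := (Nat.log2 a.num.natAbs : Int) - (Nat.log2 a.den : Int)
  let e : Int := if aPow2 e0 ≤ a then e0 else e0 - 1
  let t : ℚ := a * aPow2 (52 - e)
  let m0 : Int := ⌊t⌋
  let r : ℚ := t - (m0 : ℚ)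
  let m : Int :=
    if r < 1/2 then m0
    else if 1/2 < r then m0 + 1
    else if m0 % 2 = 0 then m0 else m0 + 1
  (if q < 0 then -1 else 1) * (m : ℚ) * aPow2 (e - 52)

-- int / int true division (Python raises on divisor 0; those inputs are outside Pre_)
def aFDiv (a b : Int) : ℚ := aRnd ((a : ℚ) / (b : ℚ))
-- float * int and float + int (the int operand is exact as a double inside Dom)
def aFMul (p : ℚ) (n : Int) : ℚ := aRnd (p * (n : ℚ))
def aFAdd (p : ℚ) (n : Int) : ℚ := aRnd (p + (n : ℚ))
-- int(float): truncation toward zero, via Int.tdiv on the rational's parts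
def aTrunc (q : ℚ) : Int := Int.tdiv q.num (q.den : Int)

-- the if/elif ladder of A as a per-value function; none = gray value in no band
def aStretch? (x r1 s1 r2 s2 : Int) : Option Int :=
  if 0 ≤ x ∧ x ≤ r1 then some (aTrunc (aFMul (aFDiv s1 r1) x))
  else if r1 < x ∧ x ≤ r2 then some (aTrunc (aFAdd (aFMul (aFDiv (s2 - s1) (r2 - r1)) (x - r1)) s1))
  else if r2 < x ∧ x ≤ 255 then some (aTrunc (aFAdd (aFMul (aFDiv (255 - s2) (255 - r2)) (x - r2)) s2))
  else none

-- getGrayColor(rgb) = rgb[0]; Python raises IndexError on an empty pixel (outside Pre_),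
-- headI is the total stand-in there
def aGray (px : List Int) : Int := px.headI

-- A: ct = deepcopy(img); index loops assigning ct[i][j]
def applyContrastStretching (img : List (List (List Int))) (r1 : Int) (s1 : Int) (r2 : Int) (s2 : Int) : List (List (List Int)) :=
  (PySem.List.pyRange 0 (img.length : Int) 1).foldl (fun ct i =>
    (PySem.List.pyRange 0 ((PySem.List.pyGetD img i []).length : Int) 1).foldl (fun ct j =>
      let x := aGray (PySem.List.pyGetD (PySem.List.pyGetD img i []) j [])
      match aStretch? x r1 s1 r2 s2 with
      | some v => ct.set i.toNat ((PySem.List.pyGetD ct i []).set j.toNat [v, v, v])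
      | none => ct) ct) img

-- ===== PORT B =====
-- B's float model: exponent by Int.log, round-half-even as ⌊t + 1/2⌋ with an
-- even-tie correction, truncation toward zero as floor/ceil by sign.
def bRnd (q : ℚ) : ℚ :=
  if q = 0 then 0 else
  let a := |q|
  let e : Int := Int.log 2 a
  let t : ℚ := a / (2:ℚ) ^ (e - 52)
  let m1 : Int := ⌊t + 1/2⌋
  let m : Int := if t + 1/2 = (m1 : ℚ) ∧ m1 % 2 = 1 then m1 - 1 else m1
  (if q < 0 then -(m : ℚ) else (m : ℚ)) * (2:ℚ) ^ (e - 52)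

def bDiv (a b : Int) : ℚ := bRnd ((a : ℚ) / (b : ℚ))
def bMul (p : ℚ) (n : Int) : ℚ := bRnd (p * (n : ℚ))
def bAdd (p : ℚ) (n : Int) : ℚ := bRnd (p + (n : ℚ))
def bTrunc (q : ℚ) : Int := if q < 0 then ⌈q⌉ else ⌊q⌋

-- setGrayColor / getGrayColor as Source B uses them
def bPix (c : Int) : List Int := [c, c, c]
def bGray (px : List Int) : Int := px.getD 0 0

-- stage 2 of Source B: the table over the distinct gray values, each stretched once
def bTable (vals : List Int) (r1 s1 r2 s2 : Int) : PySem.Dict Int (List Int) :=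
  vals.foldl (fun d x =>
    if 0 ≤ x ∧ x ≤ r1 then d.insert x (bPix (bTrunc (bMul (bDiv s1 r1) x)))
    else if r1 < x ∧ x ≤ r2 then d.insert x (bPix (bTrunc (bAdd (bMul (bDiv (s2 - s1) (r2 - r1)) (x - r1)) s1)))
    else if r2 < x ∧ x ≤ 255 then d.insert x (bPix (bTrunc (bAdd (bMul (bDiv (255 - s2) (255 - r2)) (x - r2)) s2)))
    else d) PySem.Dict.empty

-- stages 1 and 3 of Source B: dict.fromkeys over the pixel grays, then rebuild via table.get
def applyContrastStretching_alt (img : List (List (List Int))) (r1 : Int) (s1 : Int) (r2 : Int) (s2 : Int) : List (List (List Int)) :=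
  let table := bTable (PySem.List.dedup (img.flatMap (fun row => row.map bGray))) r1 s1 r2 s2
  img.map (fun row => row.map (fun px => table.getD (bGray px) px))

-- ===== PRECONDITION & SPEC =====
-- Pre_ excludes exactly the inputs where Python A raises: an empty pixel (IndexError in
-- getGrayColor), and r1 = 0 together with a pixel of gray value 0 (ZeroDivisionError in
-- the first band; the other two bands' divisors are nonzero whenever their guard holds).
def Pre_applyContrastStretching (img : List (List (List Int))) (r1 : Int) (s1 : Int) (r2 : Int) (s2 : Int) : Prop :=
  (∀ row ∈ img, ∀ px ∈ row, px ≠ []) ∧ (r1 = 0 → ∀ row ∈ img, ∀ px ∈ row, px.headI ≠ 0)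
instance (img : List (List (List Int))) (r1 : Int) (s1 : Int) (r2 : Int) (s2 : Int) : Decidable (Pre_applyContrastStretching img r1 s1 r2 s2) := by unfold Pre_applyContrastStretching; infer_instance
def pvWitness_applyContrastStretching : List (List (List Int)) × Int × Int × Int × Int :=
  ([[[10, 10, 10], [200, 200, 200]], [[0, 0, 0]]], 100, 50, 200, 220)

def Spec_applyContrastStretching (img : List (List (List Int))) (r1 : Int) (s1 : Int) (r2 : Int) (s2 : Int) (out : List (List (List Int))) : Prop := out = applyContrastStretching_alt img r1 s1 r2 s2
instance (img : List (List (List Int))) (r1 : Int) (s1 : Int) (r2 : Int) (s2 : Int) (out : List (List (List Int))) : Decidable (Spec_applyContrastStretching img r1 s1 r2 s2 out) := by unfold Spec_applyContrastStretching; infer_instance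

-- ===== CLAIM (what is proved, stated in full; the proofs are below) =====
def Claim_equal_applyContrastStretching : Prop := ∀ (img : List (List (List Int))) (r1 : Int) (s1 : Int) (r2 : Int) (s2 : Int), Dom_applyContrastStretching img r1 s1 r2 s2 → Pre_applyContrastStretching img r1 s1 r2 s2 → Spec_applyContrastStretching img r1 s1 r2 s2 (applyContrastStretching img r1 s1 r2 s2)

-- ===== LEMMAS AND PROOFS =====

-- ---- the two float models agree ----
theorem aPow2_eq_zpow (e : Int) : aPow2 e = (2:ℚ) ^ e := by
  unfold aPow2
  split
  · rw [← zpow_natCast, Int.toNat_of_nonneg (by omega)]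
  · rw [← zpow_natCast, Int.toNat_of_nonneg (by omega), one_div, ← zpow_neg, neg_neg]

theorem aExp_eq_log (a : ℚ) (ha : 0 < a) :
    (if aPow2 ((Nat.log2 a.num.natAbs : Int) - (Nat.log2 a.den : Int)) ≤ a
     then (Nat.log2 a.num.natAbs : Int) - (Nat.log2 a.den : Int)
     else (Nat.log2 a.num.natAbs : Int) - (Nat.log2 a.den : Int) - 1) = Int.log 2 a := by
  set Ln := Nat.log2 a.num.natAbs with hLn
  set Ld := Nat.log2 a.den with hLd
  have hz : ∀ n : ℕ, (2:ℚ) ^ (n : Int) = ((2 ^ n : ℕ) : ℚ) := by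
    intro n; rw [zpow_natCast]; push_cast; ring
  have hnum : 0 < a.num := Rat.num_pos.2 ha
  have hden : 0 < (a.den : ℚ) := by exact_mod_cast a.pos
  have hnumAbs : a.num.natAbs ≠ 0 := by omega
  have hdenNe : a.den ≠ 0 := a.den_nz
  have habs : ((a.num.natAbs : ℕ) : Int) = a.num := Int.natAbs_of_nonneg hnum.le
  have hnum_lb : ((2:ℚ) ^ (Ln : Int)) ≤ (a.num : ℚ) := by
    have h : 2 ^ Ln ≤ a.num.natAbs := by
      rw [hLn, Nat.log2_eq_log_two]; exact Nat.pow_log_le_self 2 hnumAbs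
    have h2 : ((2 ^ Ln : ℕ) : Int) ≤ a.num := by rw [← habs]; exact_mod_cast h
    rw [hz]; exact_mod_cast h2
  have hnum_ub : (a.num : ℚ) < (2:ℚ) ^ ((Ln : Int) + 1) := by
    have h : a.num.natAbs < 2 ^ (Ln + 1) := by
      rw [hLn, Nat.log2_eq_log_two]; exact Nat.lt_pow_succ_log_self one_lt_two a.num.natAbs
    have h2 : a.num < ((2 ^ (Ln + 1) : ℕ) : Int) := by rw [← habs]; exact_mod_cast h
    rw [show (Ln : Int) + 1 = ((Ln + 1 : ℕ) : Int) by push_cast; ring, hz]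
    exact_mod_cast h2
  have hden_lb : ((2:ℚ) ^ (Ld : Int)) ≤ (a.den : ℚ) := by
    have h : 2 ^ Ld ≤ a.den := by
      rw [hLd, Nat.log2_eq_log_two]; exact Nat.pow_log_le_self 2 hdenNe
    rw [hz]; exact_mod_cast h
  have hden_ub : (a.den : ℚ) < (2:ℚ) ^ ((Ld : Int) + 1) := by
    have h : a.den < 2 ^ (Ld + 1) := by
      rw [hLd, Nat.log2_eq_log_two]; exact Nat.lt_pow_succ_log_self one_lt_two a.den
    rw [show (Ld : Int) + 1 = ((Ld + 1 : ℕ) : Int) by push_cast; ring, hz]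
    exact_mod_cast h
  have haq : a = (a.num : ℚ) / (a.den : ℚ) := (Rat.num_div_den a).symm
  have hub : a < (2:ℚ) ^ ((Ln : Int) - (Ld : Int) + 1) := by
    rw [haq, div_lt_iff₀ hden]
    calc (a.num : ℚ) < (2:ℚ) ^ ((Ln : Int) + 1) := hnum_ub
    _ = (2:ℚ) ^ ((Ln : Int) - (Ld : Int) + 1) * (2:ℚ) ^ (Ld : Int) := by
          rw [← zpow_add₀ (two_ne_zero)]; ring_nf
    _ ≤ (2:ℚ) ^ ((Ln : Int) - (Ld : Int) + 1) * (a.den : ℚ) := by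
          apply mul_le_mul_of_nonneg_left hden_lb (by positivity)
  have hlb : (2:ℚ) ^ ((Ln : Int) - (Ld : Int) - 1) ≤ a := by
    rw [haq, le_div_iff₀ hden]
    calc (2:ℚ) ^ ((Ln : Int) - (Ld : Int) - 1) * (a.den : ℚ)
        ≤ (2:ℚ) ^ ((Ln : Int) - (Ld : Int) - 1) * (2:ℚ) ^ ((Ld : Int) + 1) := by
          apply mul_le_mul_of_nonneg_left hden_ub.le (by positivity)
    _ = (2:ℚ) ^ (Ln : Int) := by rw [← zpow_add₀ (two_ne_zero)]; ring_nf
    _ ≤ (a.num : ℚ) := hnum_lb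
  rw [aPow2_eq_zpow]
  split
  · next h =>
    have h1 := (Int.zpow_le_iff_le_log one_lt_two ha).1 h
    have h2 := (Int.lt_zpow_iff_log_lt one_lt_two ha).1 hub
    omega
  · next h =>
    push_neg at h
    have h1 := (Int.zpow_le_iff_le_log one_lt_two ha).1 hlb
    have h2 := (Int.lt_zpow_iff_log_lt one_lt_two ha).1 h
    omega

theorem mRound_eq (t : ℚ) :
    (if t - (⌊t⌋ : ℚ) < 1/2 then ⌊t⌋
     else if 1/2 < t - (⌊t⌋ : ℚ) then ⌊t⌋ + 1
     else if ⌊t⌋ % 2 = 0 then ⌊t⌋ else ⌊t⌋ + 1)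
    = (if t + 1/2 = (⌊t + 1/2⌋ : ℚ) ∧ ⌊t + 1/2⌋ % 2 = 1 then ⌊t + 1/2⌋ - 1 else ⌊t + 1/2⌋) := by
  set m0 := ⌊t⌋ with hm0
  have hr0 : (m0 : ℚ) ≤ t := Int.floor_le t
  have hr1 : t < (m0 : ℚ) + 1 := Int.lt_floor_add_one t
  rcases lt_trichotomy (t - (m0 : ℚ)) (1/2) with hlt | heq | hgt
  · have hf : ⌊t + 1/2⌋ = m0 := by
      rw [Int.floor_eq_iff]
      constructor <;> push_cast <;> linarith
    rw [if_pos hlt, hf]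
    have hne : ¬ (t + 1/2 = (m0 : ℚ) ∧ m0 % 2 = 1) := by
      rintro ⟨h, -⟩; nlinarith [hr0]
    rw [if_neg hne]
  · have hf : ⌊t + 1/2⌋ = m0 + 1 := by
      rw [Int.floor_eq_iff]
      constructor <;> push_cast <;> linarith
    have hteq : t + 1/2 = ((m0 + 1 : Int) : ℚ) := by push_cast; linarith
    rw [if_neg (by rw [← heq]; norm_num), if_neg (by rw [← heq]; norm_num), hf]
    by_cases hpar : m0 % 2 = 0
    · rw [if_pos hpar, if_pos ⟨hteq, by omega⟩]; ring
    · rw [if_neg hpar, if_neg (by rintro ⟨-, h⟩; omega)]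
  · have hf : ⌊t + 1/2⌋ = m0 + 1 := by
      rw [Int.floor_eq_iff]
      constructor <;> push_cast <;> linarith
    rw [if_neg (by linarith), if_pos hgt, hf]
    have hne : ¬ (t + 1/2 = ((m0 + 1 : Int) : ℚ) ∧ (m0 + 1) % 2 = 1) := by
      rintro ⟨h, -⟩; push_cast at h; linarith
    rw [if_neg hne]

theorem bRnd_eq_aRnd (q : ℚ) : bRnd q = aRnd q := by
  by_cases hq : q = 0
  · simp [bRnd, aRnd, hq]
  · have ha : 0 < |q| := abs_pos.2 hq
    simp only [bRnd, aRnd, if_neg hq]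
    rw [aExp_eq_log |q| ha, aPow2_eq_zpow, aPow2_eq_zpow]
    rw [show |q| * (2:ℚ) ^ ((52:Int) - Int.log 2 |q|) = |q| / (2:ℚ) ^ (Int.log 2 |q| - (52:Int)) from by
          rw [div_eq_mul_inv, ← zpow_neg, neg_sub]]
    rw [mRound_eq]
    split_ifs <;> push_cast <;> ring

theorem bTrunc_eq_aTrunc (q : ℚ) : bTrunc q = aTrunc q := by
  unfold bTrunc aTrunc
  by_cases hq : q < 0
  · rw [if_pos hq, Rat.ceil_def']
    rw [show q.num.tdiv (q.den : Int) = -((-q.num).tdiv (q.den : Int)) from by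
          rw [Int.neg_tdiv, neg_neg]]
    have hn : ¬ 0 ≤ q.num := fun hh => absurd (Rat.num_nonneg.1 hh) (not_le.2 hq)
    rw [Int.tdiv_eq_ediv_of_nonneg (by omega)]
  · rw [if_neg hq, Rat.floor_def',
        Int.tdiv_eq_ediv_of_nonneg (Rat.num_nonneg.2 (not_lt.1 hq))]

-- ---- per-value agreement of the two band pipelines ----
theorem bGray_eq_aGray (px : List Int) : bGray px = aGray px := by
  cases px <;> rfl

theorem bDiv_eq (a b : Int) : bDiv a b = aFDiv a b := by unfold bDiv aFDiv; rw [bRnd_eq_aRnd]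
theorem bMul_eq (p : ℚ) (n : Int) : bMul p n = aFMul p n := by unfold bMul aFMul; rw [bRnd_eq_aRnd]
theorem bAdd_eq (p : ℚ) (n : Int) : bAdd p n = aFAdd p n := by unfold bAdd aFAdd; rw [bRnd_eq_aRnd]

-- the table-building step, characterised through A's per-value ladder
theorem bStep_get (r1 s1 r2 s2 x y : Int) (d : PySem.Dict Int (List Int)) :
    ((if 0 ≤ x ∧ x ≤ r1 then d.insert x (bPix (bTrunc (bMul (bDiv s1 r1) x)))
      else if r1 < x ∧ x ≤ r2 then d.insert x (bPix (bTrunc (bAdd (bMul (bDiv (s2 - s1) (r2 - r1)) (x - r1)) s1)))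
      else if r2 < x ∧ x ≤ 255 then d.insert x (bPix (bTrunc (bAdd (bMul (bDiv (255 - s2) (255 - r2)) (x - r2)) s2)))
      else d).get? y)
    = if y = x ∧ (aStretch? x r1 s1 r2 s2).isSome
      then (aStretch? x r1 s1 r2 s2).map (fun v => [v, v, v])
      else d.get? y := by
  simp only [bPix, bDiv_eq, bMul_eq, bAdd_eq, bTrunc_eq_aTrunc, aStretch?]
  split_ifs with h1 h2 h3 <;> simp_all [PySem.Dict.get?_insert]

theorem bTableAux_get (vals : List Int) (r1 s1 r2 s2 y : Int) (d : PySem.Dict Int (List Int)) :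
    ((vals.foldl (fun d x =>
        if 0 ≤ x ∧ x ≤ r1 then d.insert x (bPix (bTrunc (bMul (bDiv s1 r1) x)))
        else if r1 < x ∧ x ≤ r2 then d.insert x (bPix (bTrunc (bAdd (bMul (bDiv (s2 - s1) (r2 - r1)) (x - r1)) s1)))
        else if r2 < x ∧ x ≤ 255 then d.insert x (bPix (bTrunc (bAdd (bMul (bDiv (255 - s2) (255 - r2)) (x - r2)) s2)))
        else d) d).get? y)
    = if y ∈ vals ∧ (aStretch? y r1 s1 r2 s2).isSome
      then (aStretch? y r1 s1 r2 s2).map (fun v => [v, v, v])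
      else d.get? y := by
  induction vals generalizing d with
  | nil => simp
  | cons x vs ih =>
    rw [List.foldl_cons, ih, bStep_get]
    by_cases hx : y = x
    · subst hx
      by_cases hsm : (aStretch? y r1 s1 r2 s2).isSome
      · simp [hsm]
      · simp [hsm]
    · simp [hx, List.mem_cons]

theorem bTable_get (vals : List Int) (r1 s1 r2 s2 y : Int) :
    (bTable vals r1 s1 r2 s2).get? y
    = if y ∈ vals ∧ (aStretch? y r1 s1 r2 s2).isSome
      then (aStretch? y r1 s1 r2 s2).map (fun v => [v, v, v])
      else none := by
  unfold bTable
  rw [bTableAux_get]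
  simp [PySem.Dict.get?_empty]

-- the common per-pixel normal form both programs compute
def aApplyPx (r1 s1 r2 s2 : Int) (px : List Int) : List Int :=
  match aStretch? (aGray px) r1 s1 r2 s2 with
  | some v => [v, v, v]
  | none => px

theorem pvP_set {α : Type} (row : List α) (fn : α → α) (n : Nat) (hn : n < row.length) (v : α) :
    ((row.take n).map fn ++ row.drop n).set n v = (row.take n).map fn ++ v :: row.drop (n + 1) := by
  have hlen : ((row.take n).map fn).length = n := by simp [Nat.min_eq_left hn.le]
  rw [List.set_append_right _ _ (le_of_eq hlen)]
  rw [hlen, Nat.sub_self, List.drop_eq_getElem_cons hn, List.set_cons_zero]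

theorem pvP_succ {α : Type} (row : List α) (fn : α → α) (n : Nat) (hn : n < row.length) :
    (row.take (n + 1)).map fn ++ row.drop (n + 1) = (row.take n).map fn ++ fn row[n] :: row.drop (n + 1) := by
  rw [show row.take (n+1) = row.take n ++ [row[n]] from by
        rw [List.take_add_one, List.getElem?_eq_getElem hn]; rfl,
      List.map_append, List.append_assoc]
  rfl

theorem pvA_inner (r1 s1 r2 s2 : Int) (row : List (List Int)) (k : Nat)
    (ct0 : List (List (List Int))) (hk : k < ct0.length)
    (h0 : PySem.List.pyGetD ct0 (k : Int) [] = row) (n : Nat) (hn : n ≤ row.length) :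
    (PySem.List.pyRange 0 (n : Int) 1).foldl
      (fun ct j =>
        match aStretch? (aGray (PySem.List.pyGetD row j [])) r1 s1 r2 s2 with
        | some v => ct.set k ((PySem.List.pyGetD ct (k : Int) []).set j.toNat [v, v, v])
        | none => ct) ct0
    = ct0.set k ((row.take n).map (aApplyPx r1 s1 r2 s2) ++ row.drop n) := by
  induction n with
  | zero =>
    have hr : PySem.List.pyRange 0 ((0:Nat) : Int) 1 = [] := by decide
    rw [hr]
    simp only [List.take_zero, List.map_nil, List.drop_zero, List.nil_append, List.foldl_nil]
    rw [PySem.List.pyGetD_ofNat ct0 k [] hk] at h0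
    rw [← h0, List.set_getElem_self hk]
  | succ n ih =>
    have hn' : n < row.length := hn
    have hr : ((n+1 : Nat) : Int) = (n : Int) + 1 := by push_cast; ring
    rw [hr, PySem.List.pyRange_one_succ_right (by positivity), List.foldl_append,
        ih (Nat.le_of_lt hn')]
    simp only [List.foldl_cons, List.foldl_nil]
    rw [PySem.List.pyGetD_ofNat row n [] hn']
    have hklen : k < (ct0.set k ((row.take n).map (aApplyPx r1 s1 r2 s2) ++ row.drop n)).length := by
      simpa using hk
    cases hs : aStretch? (aGray row[n]) r1 s1 r2 s2 with
    | some v =>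
      simp only [hs]
      rw [PySem.List.pyGetD_ofNat _ k [] hklen]
      rw [List.getElem_set_self]
      rw [List.set_set]
      rw [Int.toNat_natCast]
      rw [pvP_set row _ n hn']
      rw [pvP_succ row _ n hn']
      have : aApplyPx r1 s1 r2 s2 row[n] = [v, v, v] := by
        unfold aApplyPx; rw [hs]
      rw [this]
    | none =>
      simp only [hs]
      rw [pvP_succ row _ n hn']
      have : aApplyPx r1 s1 r2 s2 row[n] = row[n] := by
        unfold aApplyPx; rw [hs]
      rw [this]
      rw [← List.drop_eq_getElem_cons hn']

theorem pvA_outer (img : List (List (List Int))) (r1 s1 r2 s2 : Int) (m : Nat) (hm : m ≤ img.length) :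
    (PySem.List.pyRange 0 (m : Int) 1).foldl (fun ct i =>
      (PySem.List.pyRange 0 ((PySem.List.pyGetD img i []).length : Int) 1).foldl (fun ct j =>
        let x := aGray (PySem.List.pyGetD (PySem.List.pyGetD img i []) j [])
        match aStretch? x r1 s1 r2 s2 with
        | some v => ct.set i.toNat ((PySem.List.pyGetD ct i []).set j.toNat [v, v, v])
        | none => ct) ct) img
    = (img.take m).map (fun row => row.map (aApplyPx r1 s1 r2 s2)) ++ img.drop m := by
  induction m with
  | zero =>
    have hr : PySem.List.pyRange 0 ((0:Nat) : Int) 1 = [] := by decide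
    rw [hr]; simp
  | succ m ih =>
    have hm' : m < img.length := hm
    have hr : ((m+1 : Nat) : Int) = (m : Int) + 1 := by push_cast; ring
    rw [hr, PySem.List.pyRange_one_succ_right (by positivity), List.foldl_append,
        ih (Nat.le_of_lt hm')]
    simp only [List.foldl_cons, List.foldl_nil, Int.toNat_natCast]
    set Q := (img.take m).map (fun row => row.map (aApplyPx r1 s1 r2 s2)) ++ img.drop m with hQ
    have hQlen : Q.length = img.length := by simp [hQ, Nat.min_eq_left hm'.le]; omega
    have hQm : PySem.List.pyGetD Q ((m:Nat) : Int) [] = PySem.List.pyGetD img ((m:Nat) : Int) [] := by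
      rw [PySem.List.pyGetD_ofNat Q m [] (by omega), PySem.List.pyGetD_ofNat img m [] hm']
      simp only [hQ]
      rw [List.getElem_append_right (by simp [Nat.min_eq_left hm'.le])]
      simp [Nat.min_eq_left hm'.le]
    rw [pvA_inner r1 s1 r2 s2 (PySem.List.pyGetD img (m:Int) []) m Q (by omega) hQm
        (PySem.List.pyGetD img (m:Int) []).length (le_refl _)]
    rw [List.take_length, List.drop_length, List.append_nil]
    rw [PySem.List.pyGetD_ofNat img m [] hm']
    rw [hQ, pvP_set img _ m hm', pvP_succ img _ m hm']

theorem pvA_normal (img : List (List (List Int))) (r1 s1 r2 s2 : Int) :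
    applyContrastStretching img r1 s1 r2 s2 = img.map (fun row => row.map (aApplyPx r1 s1 r2 s2)) := by
  unfold applyContrastStretching
  rw [pvA_outer img r1 s1 r2 s2 img.length (le_refl _)]
  simp

theorem pvB_normal (img : List (List (List Int))) (r1 s1 r2 s2 : Int) :
    applyContrastStretching_alt img r1 s1 r2 s2 = img.map (fun row => row.map (aApplyPx r1 s1 r2 s2)) := by
  unfold applyContrastStretching_alt
  refine List.map_congr_left (fun row hrow => List.map_congr_left (fun px hpx => ?_))
  rw [PySem.Dict.getD_eq_get?_getD, bTable_get, bGray_eq_aGray]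
  have hy : aGray px ∈ PySem.List.dedup (img.flatMap (fun row => row.map bGray)) := by
    rw [PySem.List.mem_dedup]
    refine List.mem_flatMap.2 ⟨row, hrow, ?_⟩
    rw [← bGray_eq_aGray]
    exact List.mem_map_of_mem hpx
  unfold aApplyPx
  cases hs : aStretch? (aGray px) r1 s1 r2 s2 with
  | some v => rw [if_pos ⟨hy, rfl⟩]; rfl
  | none => rw [if_neg (by rintro ⟨-, h⟩; simp at h)]; rfl

-- ===== VERDICT (by name: the statement is the Claim_ definition above) =====
theorem applyContrastStretching_spec : Claim_equal_applyContrastStretching := by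
  intro img r1 s1 r2 s2 _ _
  unfold Spec_applyContrastStretching
  rw [pvA_normal, pvB_normal]
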